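-- pv_equiv track=rewrite | github.com/aborczuk/app-foundation | scripts/speckit_closeout_task.py | _phase_bounds
-- ===== SOURCE A (Python) =====
-- from typing import Iterable, NoReturn
--
-- def _fail(message: str) -> NoReturn:
--     raise SystemExit(message)
--
-- def _phase_bounds(lines: list[str], task_idx: int) -> tuple[int, int, str]:
--     start = 0
--     for idx in range(task_idx, -1, -1):
--         if lines[idx].startswith("## "):
--             start = idx
--             break
--     else:
--         _fail("could not determine phase heading for task")
--
--     end = len(lines)
--     for idx in range(task_idx + 1, len(lines)):
--         if lines[idx].startswith("## "):
--             end = idx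
--             break
--     return start, end, lines[start]
-- ===== SOURCE B (Python) =====
-- from typing import NoReturn
--
-- def _fail(message: str) -> NoReturn:
--     raise SystemExit(message)
--
-- def _phase_bounds(lines: list[str], task_idx: int) -> tuple[int, int, str]:
--     headings = [i for i, line in enumerate(lines) if line.startswith("## ")]
--     starts = [i for i in headings if i <= task_idx]
--     if not starts:
--         _fail("could not determine phase heading for task")
--     start = starts[-1]
--     end = next((i for i in headings if i > task_idx), len(lines))
--     return start, end, lines[start]
-- ===== Notes on version B (the rewrite author's own statement) =====
-- stated objective: alternative
-- what changed: A scans backward from task_idx and then forward from task_idx+1 with two directional loops; B builds the list of all heading indices in one enumerate pass and picks the last heading <= task_idx and the first heading > task_idx by filtering that list.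
import Mathlib
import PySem

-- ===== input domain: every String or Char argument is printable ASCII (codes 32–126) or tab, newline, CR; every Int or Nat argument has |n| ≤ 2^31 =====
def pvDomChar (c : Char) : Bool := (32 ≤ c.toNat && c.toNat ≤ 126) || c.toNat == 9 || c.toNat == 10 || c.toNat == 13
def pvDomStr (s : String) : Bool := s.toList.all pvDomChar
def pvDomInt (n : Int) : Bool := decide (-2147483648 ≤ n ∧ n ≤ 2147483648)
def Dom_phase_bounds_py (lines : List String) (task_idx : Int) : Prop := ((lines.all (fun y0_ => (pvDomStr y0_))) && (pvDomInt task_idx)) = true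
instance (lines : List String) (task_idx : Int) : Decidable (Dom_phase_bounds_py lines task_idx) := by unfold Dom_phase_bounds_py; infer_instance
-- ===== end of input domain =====

-- B replaces A's two directional scans (backward then forward from task_idx) by one pass
-- collecting all heading indices and filtering it; same O(n) cost, different decomposition.

-- ===== PORT A =====
-- backward loop `for idx in range(task_idx, -1, -1): if lines[idx].startswith("## "): start=idx; break / else _fail`;
-- `some idx` = break with start=idx, `none` = the else:_fail branch (SystemExit, excluded by Pre_).
-- Python's lines[idx] raises IndexError when idx ≥ len(lines); Pre_ excludes those inputs, so getD is exact on Pre_.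
def aBack (lines : List String) (idx : Nat) : Option Nat :=
  if PySem.Str.startswith (lines.getD idx "") "## " then some idx
  else match idx with
    | 0 => none
    | n + 1 => aBack lines n

-- forward loop `end=len(lines); for idx in range(task_idx+1, len(lines)): if heading: end=idx; break`
def aFwd (lines : List String) (idx : Nat) : Nat :=
  if idx < lines.length then
    if PySem.Str.startswith (lines.getD idx "") "## " then idx else aFwd lines (idx + 1)
  else lines.length
termination_by lines.length - idx

def phase_bounds_py (lines : List String) (task_idx : Int) : Int × Int × String :=
  match (if 0 ≤ task_idx then aBack lines task_idx.toNat else none) with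
  | none => (0, 0, "")   -- Python _fail raises SystemExit here; excluded by Pre_
  | some start =>
      let e := aFwd lines (task_idx.toNat + 1)
      ((start : Int), (e : Int), lines.getD start "")

-- ===== PORT B =====
-- headings = [i for i, line in enumerate(lines) if line.startswith("## ")]
def bHeadings (lines : List String) : List Nat :=
  (List.range lines.length).filter (fun i => PySem.Str.startswith (lines.getD i "") "## ")

def phase_bounds_py_alt (lines : List String) (task_idx : Int) : Int × Int × String :=
  let headings := bHeadings lines
  let starts := List.filter (fun i : Nat => decide ((i : Int) ≤ task_idx)) headings
  match starts.getLast? with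
  | none => (0, 0, "")   -- Python _fail raises SystemExit here; excluded by Pre_
  | some start =>
      let e := ((List.filter (fun i : Nat => decide (task_idx < (i : Int))) headings).head?).getD lines.length
      ((start : Int), (e : Int), lines.getD start "")

-- ===== PRECONDITION & SPEC =====
-- Pre_ = exactly where Python A returns: task_idx a valid index (else IndexError on lines[task_idx])
-- and some heading at an index ≤ task_idx (else _fail raises SystemExit).
def Pre_phase_bounds_py (lines : List String) (task_idx : Int) : Prop :=
  0 ≤ task_idx ∧ task_idx < lines.length ∧
  ((List.range (task_idx.toNat + 1)).any (fun i => PySem.Str.startswith (lines.getD i "") "## ")) = true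
instance (lines : List String) (task_idx : Int) : Decidable (Pre_phase_bounds_py lines task_idx) := by
  unfold Pre_phase_bounds_py; infer_instance

def pvWitness_phase_bounds_py : List String × Int := (["## A", "x"], 1)

def Spec_phase_bounds_py (lines : List String) (task_idx : Int) (out : Int × Int × String) : Prop := out = phase_bounds_py_alt lines task_idx
instance (lines : List String) (task_idx : Int) (out : Int × Int × String) : Decidable (Spec_phase_bounds_py lines task_idx out) := by unfold Spec_phase_bounds_py; infer_instance

-- ===== CLAIM (what is proved, stated in full; the proofs are below) =====
def Claim_equal_phase_bounds_py : Prop := ∀ (lines : List String) (task_idx : Int), Dom_phase_bounds_py lines task_idx → Pre_phase_bounds_py lines task_idx → Spec_phase_bounds_py lines task_idx (phase_bounds_py lines task_idx)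

-- ===== LEMMAS AND PROOFS =====

-- A's backward scan finds the LAST heading index in range (n+1)
theorem aBack_eq (lines : List String) (n : Nat) :
    aBack lines n
      = ((List.range (n+1)).filter (fun i => PySem.Str.startswith (lines.getD i "") "## ")).getLast? := by
  induction n with
  | zero =>
      rw [aBack, List.range_one, List.filter_cons, List.filter_nil]
      split_ifs <;> simp
  | succ n ih =>
      rw [List.range_succ, List.filter_append, List.getLast?_append, aBack,
          List.filter_cons, List.filter_nil]
      split_ifs
      · simp
      · rw [ih]; simp

-- A's forward scan = first heading index in range' i (len - i), default len
theorem aFwd_eq_aux (lines : List String) :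
    ∀ (n i : Nat), lines.length - i = n →
    aFwd lines i
      = (((List.range' i n).filter
            (fun j => PySem.Str.startswith (lines.getD j "") "## ")).head?).getD lines.length := by
  intro n
  induction n with
  | zero =>
      intro i hi
      have h : ¬ i < lines.length := by omega
      rw [aFwd, if_neg h]
      simp only [List.range'_zero, List.filter_nil, List.head?_nil, Option.getD_none]
  | succ n ih =>
      intro i hi
      have h : i < lines.length := by omega
      rw [aFwd, if_pos h, List.range'_succ, List.filter_cons]
      by_cases hp : PySem.Str.startswith (lines.getD i "") "## "
      · simp only [hp, if_true, List.head?_cons, Option.getD_some]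
      · simp only [hp, Bool.false_eq_true, if_false]
        exact ih (i + 1) (by omega)

theorem aFwd_eq (lines : List String) (i : Nat) :
    aFwd lines i
      = (((List.range' i (lines.length - i)).filter
            (fun j => PySem.Str.startswith (lines.getD j "") "## ")).head?).getD lines.length :=
  aFwd_eq_aux lines (lines.length - i) i rfl

-- range n filtered to indices < k is range (min k n)
theorem range_filter_lt (n k : Nat) :
    (List.range n).filter (fun i => decide (i < k)) = List.range (min k n) := by
  induction n with
  | zero => simp
  | succ n ih =>
      rw [List.range_succ, List.filter_append, ih]
      by_cases h : n < k
      · have h2 : min k n = n := by omega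
        have h3 : min k (n+1) = n + 1 := by omega
        simp [h, h2, List.range_succ]
      · have : min k (n+1) = min k n := by omega
        simp [h, this]

-- range n filtered to indices ≥ k is range' k (n - k)
theorem range_filter_ge (n k : Nat) :
    (List.range n).filter (fun i => decide (k ≤ i)) = List.range' k (n - k) := by
  induction n with
  | zero => simp
  | succ n ih =>
      rw [List.range_succ, List.filter_append, ih]
      by_cases h : k ≤ n
      · have hs : n + 1 - k = (n - k) + 1 := by omega
        rw [hs, List.range'_1_concat]
        have : k + (n - k) = n := by omega
        simp [h, this]
      · have : n + 1 - k = 0 := by omega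
        have h2 : n - k = 0 := by omega
        simp [h, this, h2]

-- ===== VERDICT =====
theorem phase_bounds_py_spec : Claim_equal_phase_bounds_py := by
  intro lines t _hdom hpre
  obtain ⟨ht0, htlen, _hany⟩ := hpre
  unfold Spec_phase_bounds_py phase_bounds_py phase_bounds_py_alt bHeadings
  have hrlt : List.range (t.toNat + 1)
      = (List.range lines.length).filter (fun i => decide (i < t.toNat + 1)) := by
    rw [range_filter_lt]
    congr 1
    omega
  have hstarts :
      List.filter (fun i : Nat => decide ((i : Int) ≤ t))
          ((List.range lines.length).filter (fun i => PySem.Str.startswith (lines.getD i "") "## "))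
        = (List.range (t.toNat + 1)).filter (fun i => PySem.Str.startswith (lines.getD i "") "## ") := by
    rw [hrlt, List.filter_filter, List.filter_filter]
    apply List.filter_congr
    intro i _
    by_cases hq : (i : Int) ≤ t
    · have : i < t.toNat + 1 := by omega
      simp [hq, this]
    · have : ¬ i < t.toNat + 1 := by omega
      simp [hq, this]
  have hend :
      List.filter (fun i : Nat => decide (t < (i : Int)))
          ((List.range lines.length).filter (fun i => PySem.Str.startswith (lines.getD i "") "## "))
        = (List.range' (t.toNat + 1) (lines.length - (t.toNat + 1))).filter
            (fun i => PySem.Str.startswith (lines.getD i "") "## ") := by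
    rw [← range_filter_ge lines.length (t.toNat + 1), List.filter_filter, List.filter_filter]
    apply List.filter_congr
    intro i _
    by_cases hq : t < (i : Int)
    · have : t.toNat + 1 ≤ i := by omega
      simp [hq, this]
    · have : ¬ t.toNat + 1 ≤ i := by omega
      simp [hq, this]
  rw [if_pos ht0, aBack_eq]
  dsimp only
  rw [hstarts, aFwd_eq, hend]
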